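-- pv_equiv track=rewrite | github.com/jrconway3/lt-maker | app/editor/event_editor/event_autocompleter.py | determine_arg_index_from_list_of_args_and_cursor_pos
-- ===== SOURCE A (Python) =====
-- from typing import Any, Dict, List, Optional, Tuple, Type
--
-- def determine_arg_index_from_list_of_args_and_cursor_pos(args: List[str], cursor_pos: int) -> int:
--     """
--     Find the current argument under the cursor_pos
--     Returns -1 if argument is the command itself
--     Returns 0, 1, 2, etc. for the first keyword, second keyword, third keyword and so on
--     """
--     curr_arg_idx = -1
--     curr_arg = args[curr_arg_idx + 1]
--     while cursor_pos > len(curr_arg):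
--         curr_arg_idx += 1
--         cursor_pos -= (len(curr_arg) + 1)  # Add the semicolon
--         if curr_arg_idx + 1 >= len(args):
--             break
--         else:
--             curr_arg = args[curr_arg_idx + 1]
--     return curr_arg_idx
-- ===== SOURCE B (Python) =====
-- def determine_arg_index_from_list_of_args_and_cursor_pos(args, cursor_pos):
--     # Boundary table: bounds[p] = sum(len(args[j]) + 1 for j < p) + len(args[p]).
--     bounds = []
--     acc = 0
--     for a in args:
--         bounds.append(acc + len(a))
--         acc += len(a) + 1
--     # First p whose boundary reaches cursor_pos; past the end -> last index.
--     return next((p - 1 for p, t in enumerate(bounds) if cursor_pos <= t),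
--                 len(args) - 1)
-- ===== Notes on version B (the rewrite author's own statement) =====
-- stated objective: alternative
-- what changed: Replaces the stateful while-loop that mutates cursor_pos and re-indexes the list with a precomputed strictly-increasing boundary table followed by a first-match scan.
-- outside the precondition, e.g. on determine_arg_index_from_list_of_args_and_cursor_pos([], 5): A raises IndexError, B returns -1
import Mathlib
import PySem

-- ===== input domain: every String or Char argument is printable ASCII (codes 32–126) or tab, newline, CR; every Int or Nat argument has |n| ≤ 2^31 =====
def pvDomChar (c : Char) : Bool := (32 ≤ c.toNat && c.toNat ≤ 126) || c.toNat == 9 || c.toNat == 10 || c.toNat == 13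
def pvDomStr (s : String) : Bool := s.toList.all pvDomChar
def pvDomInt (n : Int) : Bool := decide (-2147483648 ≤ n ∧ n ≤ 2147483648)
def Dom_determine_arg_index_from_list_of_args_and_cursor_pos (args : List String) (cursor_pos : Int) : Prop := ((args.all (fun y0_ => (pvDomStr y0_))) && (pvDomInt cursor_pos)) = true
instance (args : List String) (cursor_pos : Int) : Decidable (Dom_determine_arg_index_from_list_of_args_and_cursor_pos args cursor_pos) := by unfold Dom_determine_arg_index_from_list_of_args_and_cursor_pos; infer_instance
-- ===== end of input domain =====

-- B replaces A's stateful while-loop with a precomputed boundary table plus a first-match scan (alternative decomposition, same cost); Pre_ excludes only the empty list, where Python A raises IndexError (B returns -1 there).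


-- ===== PORT A =====
-- A's while-loop: curr_arg walks the list tail; idx and cursor_pos are mutated as in Python.
def pvLoopA : List String → Int → Int → String → Int
  | rest, idx, cursor, curr =>
    if cursor > (PySem.Str.len curr) then
      match rest with
      | [] => idx + 1                       -- break: curr_arg_idx+1 >= len(args)
      | c :: rs => pvLoopA rs (idx + 1) (cursor - (PySem.Str.len curr + 1)) c
    else idx

def determine_arg_index_from_list_of_args_and_cursor_pos (args : List String) (cursor_pos : Int) : Int :=
  match args with
  | [] => 0                                 -- Python raises IndexError here (excluded by Pre_)
  | a :: rest => pvLoopA rest (-1) cursor_pos a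

-- ===== PORT B =====
-- bounds loop of Source B
def pvBounds : List String → Int → List Int
  | [], _ => []
  | a :: rs, acc => (acc + PySem.Str.len a) :: pvBounds rs (acc + PySem.Str.len a + 1)

-- next((p - 1 for p, t in enumerate(bounds) if cursor_pos <= t), default)
def pvFindB : List Int → Int → Int → Int → Int
  | [], _, _, dflt => dflt
  | t :: ts, cursor, p, dflt => if cursor ≤ t then p - 1 else pvFindB ts cursor (p + 1) dflt

def determine_arg_index_from_list_of_args_and_cursor_pos_alt (args : List String) (cursor_pos : Int) : Int :=
  pvFindB (pvBounds args 0) cursor_pos 0 ((args.length : Int) - 1)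

-- ===== PRECONDITION & SPEC =====
-- Pre_ excludes only the empty list, on which Python A raises IndexError.
def Pre_determine_arg_index_from_list_of_args_and_cursor_pos (args : List String) (cursor_pos : Int) : Prop := args ≠ []
instance (args : List String) (cursor_pos : Int) : Decidable (Pre_determine_arg_index_from_list_of_args_and_cursor_pos args cursor_pos) := by unfold Pre_determine_arg_index_from_list_of_args_and_cursor_pos; infer_instance
def pvWitness_determine_arg_index_from_list_of_args_and_cursor_pos : List String × Int := (["speak", "eirika"], 8)

def Spec_determine_arg_index_from_list_of_args_and_cursor_pos (args : List String) (cursor_pos : Int) (out : Int) : Prop := out = determine_arg_index_from_list_of_args_and_cursor_pos_alt args cursor_pos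
instance (args : List String) (cursor_pos : Int) (out : Int) : Decidable (Spec_determine_arg_index_from_list_of_args_and_cursor_pos args cursor_pos out) := by unfold Spec_determine_arg_index_from_list_of_args_and_cursor_pos; infer_instance

-- ===== CLAIM (what is proved, stated in full; the proofs are below) =====
def Claim_equal_determine_arg_index_from_list_of_args_and_cursor_pos : Prop := ∀ (args : List String) (cursor_pos : Int), Dom_determine_arg_index_from_list_of_args_and_cursor_pos args cursor_pos → Pre_determine_arg_index_from_list_of_args_and_cursor_pos args cursor_pos → Spec_determine_arg_index_from_list_of_args_and_cursor_pos args cursor_pos (determine_arg_index_from_list_of_args_and_cursor_pos args cursor_pos)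

-- ===== LEMMAS AND PROOFS =====
-- Loop/table correspondence, with the running offset `acc` generalized.
theorem pvLoopA_nil (idx cur : Int) (curr : String) :
    pvLoopA [] idx cur curr = if cur > PySem.Str.len curr then idx + 1 else idx := rfl

theorem pvLoopA_cons (c : String) (rs : List String) (idx cur : Int) (curr : String) :
    pvLoopA (c :: rs) idx cur curr =
      if cur > PySem.Str.len curr then pvLoopA rs (idx + 1) (cur - (PySem.Str.len curr + 1)) c
      else idx := rfl

theorem pvBounds_cons (a : String) (rs : List String) (acc : Int) :
    pvBounds (a :: rs) acc =
      (acc + PySem.Str.len a) :: pvBounds rs (acc + PySem.Str.len a + 1) := rfl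

theorem pvFindB_nil (c p d : Int) : pvFindB [] c p d = d := rfl

theorem pvFindB_cons (t : Int) (ts : List Int) (c p d : Int) :
    pvFindB (t :: ts) c p d = if c ≤ t then p - 1 else pvFindB ts c (p + 1) d := rfl

theorem pvLoopA_eq_findB (rest : List String) (idx cursor acc : Int) (curr : String) :
    pvLoopA rest idx (cursor - acc) curr =
      pvFindB (pvBounds (curr :: rest) acc) cursor (idx + 1) (idx + 1 + rest.length) := by
  induction rest generalizing idx cursor acc curr with
  | nil =>
      rw [pvLoopA_nil, pvBounds_cons,
          show pvBounds [] (acc + PySem.Str.len curr + 1) = [] from rfl,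
          pvFindB_cons, pvFindB_nil]
      simp only [List.length_nil]
      split_ifs with h1 h2 <;> push_cast <;> omega
  | cons c rs ih =>
      rw [pvLoopA_cons, pvBounds_cons, pvFindB_cons]
      by_cases h1 : cursor - acc > PySem.Str.len curr
      · rw [if_pos h1, if_neg (by omega),
            show cursor - acc - (PySem.Str.len curr + 1) = cursor - (acc + PySem.Str.len curr + 1) from by omega,
            ih]
        congr 1
        simp only [List.length_cons]
        push_cast
        omega
      · rw [if_neg h1, if_pos (by omega)]
        omega

-- ===== VERDICT (by name: the statement is the Claim_ definition above) =====
theorem determine_arg_index_from_list_of_args_and_cursor_pos_spec : Claim_equal_determine_arg_index_from_list_of_args_and_cursor_pos := by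
  intro args cursor_pos _ hpre
  unfold Spec_determine_arg_index_from_list_of_args_and_cursor_pos
  match args with
  | [] => exact absurd rfl hpre
  | a :: rest =>
      show pvLoopA rest (-1) cursor_pos a
          = pvFindB (pvBounds (a :: rest) 0) cursor_pos 0 (((a :: rest).length : Int) - 1)
      have hd : (((a :: rest).length : Int)) - 1 = -1 + 1 + (rest.length : Int) := by
        simp only [List.length_cons]; push_cast; omega
      rw [hd]
      have h := pvLoopA_eq_findB rest (-1) cursor_pos 0 a
      rw [sub_zero] at h
      rw [h]
      norm_num
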